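-- pv_equiv track=rewrite | github.com/faisalkindi/CrimsonDesert-UltimateModsManager | src/cdumm/engine/css_patch_handler.py | _find_brace_open
-- ===== SOURCE A (Python) =====
-- def _find_brace_open(text: str, start: int) -> int:
--     n = len(text)
--     i = start
--     while i < n:
--         c = text[i]
--         if c == "/" and i + 1 < n and text[i + 1] == "*":
--             close = text.find("*/", i + 2)
--             if close < 0:
--                 return -1
--             i = close + 2
--             continue
--         if c in ("\"", "'"):
--             i = _skip_string(text, i) + 1
--             continue
--         if c == "{":
--             return i
--         if c in (";", "}"):
--             return -1
--         i += 1
--     return -1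
--
-- def _skip_string(text: str, start: int) -> int:
--     quote = text[start]
--     i = start + 1
--     n = len(text)
--     while i < n:
--         if text[i] == "\\":
--             i += 2
--             continue
--         if text[i] == quote:
--             return i
--         i += 1
--     return n - 1
-- ===== SOURCE B (Python) =====
-- def _find_brace_open(text: str, start: int) -> int:
--     # Two staged passes: pass 1 sanitizes (blanks out comments and quoted strings
--     # from `start` on); pass 2 is a trivial scan of the sanitized text.
--     n = len(text)
--     buf = list(text)
--     state = 0  # 0 = code, 1 = comment, 2 = string
--     quote = ""
--     i = start
--     while i < n:
--         c = text[i]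
--         if state == 1:
--             if c == "*" and i + 1 < n and text[i + 1] == "/":
--                 buf[i] = buf[i + 1] = " "
--                 state = 0
--                 i += 2
--             else:
--                 buf[i] = " "
--                 i += 1
--         elif state == 2:
--             if c == "\\":
--                 buf[i] = " "
--                 if i + 1 < n:
--                     buf[i + 1] = " "
--                 i += 2
--             elif c == quote:
--                 buf[i] = " "
--                 state = 0
--                 i += 1
--             else:
--                 buf[i] = " "
--                 i += 1
--         else:
--             if c == "/" and i + 1 < n and text[i + 1] == "*":
--                 buf[i] = buf[i + 1] = " "
--                 state = 1
--                 i += 2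
--             elif c == '"' or c == "'":
--                 buf[i] = " "
--                 state = 2
--                 quote = c
--                 i += 1
--             else:
--                 i += 1
--     i = start
--     while i < n:
--         c = buf[i]
--         if c == "{":
--             return i
--         if c == ";" or c == "}":
--             return -1
--         i += 1
--     return -1
-- ===== Notes on version B (the rewrite author's own statement) =====
-- stated objective: alternative
-- what changed: Replaced A's interleaved decide-while-skipping scan (main loop calling str.find('*/') and a _skip_string helper with index handoff, returning mid-scan) by two staged passes: pass 1 sanitizes the text, blanking out comments and quoted strings into a buffer and never returning early, and pass 2 is a trivial scan of the sanitized buffer for the first '{', ';' or '}'; Pre_ excludes negative start, where Python's negative indexing makes both programs read wrapped-around characters (an accident of indexing, and both raise IndexError below -len(text)).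
-- outside the precondition, e.g. on _find_brace_open('x/*ab*/{', -8): A returns 7, B returns -1
import Mathlib
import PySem

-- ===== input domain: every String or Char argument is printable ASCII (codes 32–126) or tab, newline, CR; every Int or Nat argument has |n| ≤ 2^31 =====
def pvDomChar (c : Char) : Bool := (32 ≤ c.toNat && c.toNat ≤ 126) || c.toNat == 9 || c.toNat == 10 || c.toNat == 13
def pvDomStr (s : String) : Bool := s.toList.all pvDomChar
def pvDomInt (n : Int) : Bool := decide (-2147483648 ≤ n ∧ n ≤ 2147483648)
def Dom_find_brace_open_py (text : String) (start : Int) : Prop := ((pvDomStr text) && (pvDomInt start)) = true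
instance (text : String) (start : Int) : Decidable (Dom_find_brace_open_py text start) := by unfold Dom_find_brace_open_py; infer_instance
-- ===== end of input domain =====

-- Alternative re-implementation: A's interleaved decide-while-skipping scan (main loop +
-- find("*/") + _skip_string with index handoff) becomes two staged passes — sanitize the
-- text into a buffer, then a trivial scan of it; equal on every non-negative start (Pre_).


-- ===== PORT A =====
-- termination measures cited by the ports' decreasing_by (they must precede the ports; see layout rule)
theorem pvStep1 {n i : Int} (h : i < n) : (n - (i+1)).toNat < (n - i).toNat :=
  (Int.toNat_lt_toNat (Int.sub_pos.mpr h)).mpr (sub_lt_sub_left (lt_add_one i) n)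
theorem pvStep2 {n i : Int} (h : i < n) : (n - (i+2)).toNat < (n - i).toNat :=
  (Int.toNat_lt_toNat (Int.sub_pos.mpr h)).mpr
    (sub_lt_sub_left (lt_add_of_pos_right i two_pos) n)
theorem pvStepFind {n j : Int} (h : j + 2 ≤ n) : (n + 2 - (j+1)).toNat < (n + 2 - j).toNat :=
  (Int.toNat_lt_toNat (Int.sub_pos.mpr
      ((lt_add_of_pos_right j two_pos).trans_le (h.trans (le_add_of_nonneg_right zero_le_two))))).mpr
    (sub_lt_sub_left (lt_add_one j) (n+2))
theorem pvStepClose {n i close : Int} (hi : i < n) (hge : close = -1 ∨ i + 2 ≤ close)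
    (hcl : ¬ close < 0) : (n - (close+2)).toNat < (n - i).toNat :=
  (Int.toNat_lt_toNat (Int.sub_pos.mpr hi)).mpr
    (sub_lt_sub_left
      (hge.elim
        (fun h => absurd (h ▸ (neg_neg_iff_pos.mpr one_pos : (-1:Int) < 0)) hcl)
        (fun h => ((lt_add_of_pos_right i two_pos).trans_le h).trans
          (lt_add_of_pos_right close two_pos)))
      n)
theorem pvStepSkip {n i s : Int} (hi : i < n) (hge : i + 1 ≤ s ∨ s = n - 1) :
    (n - (s+1)).toNat < (n - i).toNat :=
  hge.elim
    (fun h => (Int.toNat_lt_toNat (Int.sub_pos.mpr hi)).mpr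
      (sub_lt_sub_left (((lt_add_one i).trans_le h).trans (lt_add_one s)) n))
    (fun h => by
      subst h
      rw [sub_add_cancel, sub_self]
      exact (Int.toNat_lt_toNat (Int.sub_pos.mpr hi)).mpr (Int.sub_pos.mpr hi))

-- text.find("*/", j): first position p ≥ j with "*/" at p, else -1 (exact for j ≥ 0, the only way A calls it)
def findSS_A (cs : List Char) (j : Int) : Int :=
  if _h : j + 2 ≤ (cs.length : Int) then
    if (PySem.List.pyGet? cs j).getD '\x00' = '*' ∧ (PySem.List.pyGet? cs (j+1)).getD '\x00' = '/' then j
    else findSS_A cs (j+1)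
  else -1
termination_by ((cs.length : Int) + 2 - j).toNat
decreasing_by exact pvStepFind _h

-- result of find is -1 or ≥ its start (termination helper for loopA, cited in decreasing_by)
theorem findSS_A_ge (cs : List Char) (j : Int) : findSS_A cs j = -1 ∨ j ≤ findSS_A cs j := by
  induction j using findSS_A.induct cs with
  | case1 j h hm => rw [findSS_A]; simp [h, hm]
  | case2 j h hm ih => rw [findSS_A]; simp only [dif_pos h, if_neg hm]; omega
  | case3 j h => rw [findSS_A]; simp [h]

-- the while loop of _skip_string (text[i] via pyGet?, exact for 0 ≤ i; '\x00' default unreachable there)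
def skipLoopA (cs : List Char) (quote : Char) (i : Int) : Int :=
  if _h : i < (cs.length : Int) then
    let c := (PySem.List.pyGet? cs i).getD '\x00'
    if c = '\\' then skipLoopA cs quote (i+2)
    else if c = quote then i
    else skipLoopA cs quote (i+1)
  else (cs.length : Int) - 1
termination_by ((cs.length : Int) - i).toNat
decreasing_by
  · exact pvStep2 _h
  · exact pvStep1 _h

-- result of the skip loop is ≥ its start or len-1 (termination helper for loopA)
theorem skipLoopA_ge (cs : List Char) (quote : Char) (i : Int) :
    i ≤ skipLoopA cs quote i ∨ skipLoopA cs quote i = (cs.length : Int) - 1 := by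
  induction i using skipLoopA.induct cs quote with
  | case1 i h c hb ih => rw [skipLoopA]; simp only [dif_pos h]; rw [if_pos hb]; omega
  | case2 i h c hb hq => rw [skipLoopA]; simp only [dif_pos h]; rw [if_neg hb, if_pos hq]; omega
  | case3 i h c hb hq ih => rw [skipLoopA]; simp only [dif_pos h]; rw [if_neg hb, if_neg hq]; omega
  | case4 i h => rw [skipLoopA]; simp [h]

def skipStringA (cs : List Char) (start : Int) : Int :=
  skipLoopA cs ((PySem.List.pyGet? cs start).getD '\x00') (start + 1)

-- the main while loop of _find_brace_open
def loopA (cs : List Char) (i : Int) : Int :=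
  if _h : i < (cs.length : Int) then
    let c := (PySem.List.pyGet? cs i).getD '\x00'
    if hc : c = '/' ∧ i + 1 < (cs.length : Int) ∧ (PySem.List.pyGet? cs (i+1)).getD '\x00' = '*' then
      let close := findSS_A cs (i+2)
      if hcl : close < 0 then -1 else loopA cs (close + 2)
    else if c = '"' ∨ c = '\'' then loopA cs (skipStringA cs i + 1)
    else if c = '{' then i
    else if c = ';' ∨ c = '}' then -1
    else loopA cs (i+1)
  else -1
termination_by ((cs.length : Int) - i).toNat
decreasing_by
  · exact pvStepClose _h (findSS_A_ge cs (i+2)) hcl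
  · unfold skipStringA
    exact pvStepSkip _h (skipLoopA_ge cs ((PySem.List.pyGet? cs i).getD '\x00') (i+1))
  · exact pvStep1 _h

def find_brace_open_py (text : String) (start : Int) : Int := loopA text.toList start

-- ===== PORT B =====
inductive CssSt where
  | normal
  | comment
  | instr (q : Char)
deriving DecidableEq, Repr

-- pass 1 of B: blank comments and quoted strings of cs into buf from i on
-- (buf[i] = " " ported as buf.set i.toNat ' ': exact for 0 ≤ i, the only way B runs under Pre_)
def maskB (cs : List Char) (st : CssSt) (i : Int) (buf : List Char) : List Char :=
  if _h : i < (cs.length : Int) then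
    let c := (PySem.List.pyGet? cs i).getD '\x00'
    match st with
    | .comment =>
      if c = '*' ∧ i + 1 < (cs.length : Int) ∧ (PySem.List.pyGet? cs (i+1)).getD '\x00' = '/' then
        maskB cs .normal (i+2) ((buf.set i.toNat ' ').set (i+1).toNat ' ')
      else maskB cs .comment (i+1) (buf.set i.toNat ' ')
    | .instr q =>
      if c = '\\' then
        maskB cs (.instr q) (i+2)
          (if i + 1 < (cs.length : Int) then (buf.set i.toNat ' ').set (i+1).toNat ' '
           else buf.set i.toNat ' ')
      else if c = q then maskB cs .normal (i+1) (buf.set i.toNat ' ')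
      else maskB cs (.instr q) (i+1) (buf.set i.toNat ' ')
    | .normal =>
      if c = '/' ∧ i + 1 < (cs.length : Int) ∧ (PySem.List.pyGet? cs (i+1)).getD '\x00' = '*' then
        maskB cs .comment (i+2) ((buf.set i.toNat ' ').set (i+1).toNat ' ')
      else if c = '"' ∨ c = '\'' then maskB cs (.instr c) (i+1) (buf.set i.toNat ' ')
      else maskB cs .normal (i+1) buf
  else buf
termination_by ((cs.length : Int) - i).toNat
decreasing_by all_goals first | exact pvStep2 _h | exact pvStep1 _h

-- pass 2 of B: trivial scan of the sanitized buffer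
def searchB (buf : List Char) (i : Int) : Int :=
  if _h : i < (buf.length : Int) then
    let c := (PySem.List.pyGet? buf i).getD '\x00'
    if c = '{' then i
    else if c = ';' ∨ c = '}' then -1
    else searchB buf (i+1)
  else -1
termination_by ((buf.length : Int) - i).toNat
decreasing_by exact pvStep1 _h

def find_brace_open_py_alt (text : String) (start : Int) : Int :=
  searchB (maskB text.toList .normal start text.toList) start

-- ===== PRECONDITION & SPEC =====
-- Pre_ excludes negative start: there Python's negative indexing makes both programs read
-- wrapped-around characters (an accident of indexing; below -len(text) both raise IndexError).
def Pre_find_brace_open_py (text : String) (start : Int) : Prop := 0 ≤ start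
instance (text : String) (start : Int) : Decidable (Pre_find_brace_open_py text start) := by unfold Pre_find_brace_open_py; infer_instance

def pvWitness_find_brace_open_py : String × Int := ("p /*;*/ { x }", 0)

def Spec_find_brace_open_py (text : String) (start : Int) (out : Int) : Prop := out = find_brace_open_py_alt text start
instance (text : String) (start : Int) (out : Int) : Decidable (Spec_find_brace_open_py text start out) := by unfold Spec_find_brace_open_py; infer_instance

-- ===== CLAIM (what is proved, stated in full; the proofs are below) =====
def Claim_equal_find_brace_open_py : Prop := ∀ (text : String) (start : Int), Dom_find_brace_open_py text start → Pre_find_brace_open_py text start → Spec_find_brace_open_py text start (find_brace_open_py text start)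

-- ===== LEMMAS AND PROOFS =====

-- pass 1 never touches a position below its index
theorem maskB_preserve (cs : List Char) (st : CssSt) (i : Int) (buf : List Char) :
    ∀ j : Nat, (j : Int) < i → (maskB cs st i buf)[j]? = buf[j]? := by
  induction st, i, buf using maskB.induct cs with
  | case1 i buf hlt c hm ih =>
    intro j hj
    rw [maskB]; simp only [dif_pos hlt]; rw [if_pos hm]
    rw [ih j (by omega), List.getElem?_set_ne (by omega), List.getElem?_set_ne (by omega)]
  | case2 i buf hlt c hm ih =>
    intro j hj
    rw [maskB]; simp only [dif_pos hlt]; rw [if_neg hm]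
    rw [ih j (by omega), List.getElem?_set_ne (by omega)]
  | case3 i buf hlt c q hb ih =>
    intro j hj
    rw [maskB]; simp only [dif_pos hlt]; rw [if_pos hb]
    simp only [dite_eq_ite] at ih
    rw [ih j (by omega)]
    split
    · rw [List.getElem?_set_ne (by omega), List.getElem?_set_ne (by omega)]
    · rw [List.getElem?_set_ne (by omega)]
  | case4 i buf hlt c hb ih =>
    intro j hj
    rw [maskB]; simp only [dif_pos hlt]; rw [if_neg hb, if_pos (Eq.refl c)]
    rw [ih j (by omega), List.getElem?_set_ne (by omega)]
  | case5 i buf hlt c q hb hq ih =>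
    intro j hj
    rw [maskB]; simp only [dif_pos hlt]; rw [if_neg hb, if_neg hq]
    rw [ih j (by omega), List.getElem?_set_ne (by omega)]
  | case6 i buf hlt c hm ih =>
    intro j hj
    rw [maskB]; simp only [dif_pos hlt]; rw [if_pos hm]
    rw [ih j (by omega), List.getElem?_set_ne (by omega), List.getElem?_set_ne (by omega)]
  | case7 i buf hlt c hm hq ih =>
    intro j hj
    rw [maskB]; simp only [dif_pos hlt]; rw [if_neg hm, if_pos hq]
    rw [ih j (by omega), List.getElem?_set_ne (by omega)]
  | case8 i buf hlt c hm hq ih =>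
    intro j hj
    rw [maskB]; simp only [dif_pos hlt]; rw [if_neg hm, if_neg hq]
    exact ih j (by omega)
  | case9 st i buf h =>
    intro j hj
    rw [maskB]; simp [show ¬ i < (cs.length : Int) by omega]

-- pass 1 preserves the buffer length
theorem maskB_length (cs : List Char) (st : CssSt) (i : Int) (buf : List Char) :
    (maskB cs st i buf).length = buf.length := by
  induction st, i, buf using maskB.induct cs with
  | case1 i buf hlt c hm ih =>
    rw [maskB]; simp only [dif_pos hlt]; rw [if_pos hm]; simpa using ih
  | case2 i buf hlt c hm ih =>
    rw [maskB]; simp only [dif_pos hlt]; rw [if_neg hm]; simpa using ih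
  | case3 i buf hlt c q hb ih =>
    rw [maskB]; simp only [dif_pos hlt]; rw [if_pos hb]
    simp only [dite_eq_ite] at ih
    rw [ih]; split <;> simp
  | case4 i buf hlt c hb ih =>
    rw [maskB]; simp only [dif_pos hlt]; rw [if_neg hb, if_pos (Eq.refl c)]; simpa using ih
  | case5 i buf hlt c q hb hq ih =>
    rw [maskB]; simp only [dif_pos hlt]; rw [if_neg hb, if_neg hq]; simpa using ih
  | case6 i buf hlt c hm ih =>
    rw [maskB]; simp only [dif_pos hlt]; rw [if_pos hm]; simpa using ih
  | case7 i buf hlt c hm hq ih =>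
    rw [maskB]; simp only [dif_pos hlt]; rw [if_neg hm, if_pos hq]; simpa using ih
  | case8 i buf hlt c hm hq ih =>
    rw [maskB]; simp only [dif_pos hlt]; rw [if_neg hm, if_neg hq]
    exact ih
  | case9 st i buf h =>
    rw [maskB]; simp [show ¬ i < (cs.length : Int) by omega]

-- reading a known character drives one step of pass 2
theorem searchB_of_get (m : List Char) (i : Int) (c : Char) (h0 : 0 ≤ i) (hc : m[i.toNat]? = some c) :
    searchB m i = if c = '{' then i else if c = ';' ∨ c = '}' then -1 else searchB m (i+1) := by
  obtain ⟨hlen, he⟩ := List.getElem?_eq_some_iff.mp hc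
  have hi : i < (m.length : Int) := by omega
  have hg : (PySem.List.pyGet? m i).getD '\x00' = c := by
    rw [PySem.List.pyGet?_eq_some_getElem m h0 hi]; simpa using he
  rw [searchB]; simp only [dif_pos hi, hg]

-- pass 2 walks over a blanked-out position
theorem searchB_blank (m : List Char) (i : Int) (h0 : 0 ≤ i) (hc : m[i.toNat]? = some ' ') :
    searchB m i = searchB m (i+1) := by
  rw [searchB_of_get m i ' ' h0 hc, if_neg (by decide), if_neg (by decide)]

-- pass 2 past the end of the buffer
theorem searchB_end (m : List Char) (i : Int) (h : (m.length : Int) ≤ i) : searchB m i = -1 := by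
  rw [searchB]; simp [show ¬ i < (m.length : Int) by omega]

-- the three correspondences at once, past the end of the text (shared base case):
-- normal mode sanitation+scan is A's main loop; comment mode is A's find("*/")-then-resume;
-- string mode is A's _skip_string-then-resume.
theorem css_end (cs : List Char) (i : Int) (buf : List Char) (_h0 : 0 ≤ i)
    (hn : (cs.length : Int) ≤ i) (hbl : buf.length = cs.length) :
    (searchB (maskB cs .normal i buf) i = loopA cs i)
    ∧ (searchB (maskB cs .comment i buf) i =
        (if findSS_A cs i < 0 then -1 else loopA cs (findSS_A cs i + 2)))
    ∧ (∀ q, searchB (maskB cs (.instr q) i buf) i = loopA cs (skipLoopA cs q i + 1)) := by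
  have hni : ¬ i < (cs.length : Int) := by omega
  have hm : ∀ st, maskB cs st i buf = buf := by intro st; rw [maskB]; simp [hni]
  have hs : searchB buf i = -1 := searchB_end buf i (by omega)
  refine ⟨?_, ?_, ?_⟩
  · rw [hm, hs, loopA]; simp [hni]
  · rw [hm, hs, findSS_A]
    have h2 : ¬ (i + 2 ≤ (cs.length : Int)) := by omega
    simp only [dif_neg h2]
    norm_num
  · intro q
    rw [hm, hs, skipLoopA]
    simp only [dif_neg hni]
    rw [loopA]
    simp

-- main invariant, by strong induction on the distance to the end of the text
theorem css_mask (cs : List Char) : ∀ (k : Nat) (i : Int) (buf : List Char), 0 ≤ i →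
    (((cs.length : Int) - i).toNat ≤ k) → buf.length = cs.length →
    (∀ j : Nat, i ≤ (j : Int) → buf[j]? = cs[j]?) →
    (searchB (maskB cs .normal i buf) i = loopA cs i)
    ∧ (searchB (maskB cs .comment i buf) i =
        (if findSS_A cs i < 0 then -1 else loopA cs (findSS_A cs i + 2)))
    ∧ (∀ q, searchB (maskB cs (.instr q) i buf) i = loopA cs (skipLoopA cs q i + 1)) := by
  intro k
  induction k with
  | zero =>
    intro i buf h0 hk hbl _
    exact css_end cs i buf h0 (by omega) hbl
  | succ k ih =>
    intro i buf h0 hk hbl hag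
    by_cases hi : i < (cs.length : Int)
    swap
    · exact css_end cs i buf h0 (by omega) hbl
    have hlt : i.toNat < cs.length := by omega
    have hgd : (PySem.List.pyGet? cs i).getD '\x00' = cs[i.toNat] := by
      rw [PySem.List.pyGet?_eq_some_getElem cs h0 hi]
      rfl
    set c := cs[i.toNat] with hcdef
    -- the blanked positions: one-set and two-set buffers
    have hset1 : ∀ buf' : List Char, buf'.length = cs.length →
        (buf'.set i.toNat ' ')[i.toNat]? = some ' ' := by
      intro buf' hb; exact List.getElem?_set_self (by omega)
    refine ⟨?_, ?_, ?_⟩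
    · -- normal mode: sanitize + scan ↔ A's main loop
      rw [loopA, maskB]
      simp only [dif_pos hi, hgd]
      by_cases hsl : c = '/' ∧ i + 1 < (cs.length : Int) ∧ (PySem.List.pyGet? cs (i+1)).getD '\x00' = '*'
      · simp only [dif_pos hsl, if_pos hsl]
        set buf2 := (buf.set i.toNat ' ').set (i+1).toNat ' ' with hbuf2
        have hbl2 : buf2.length = cs.length := by simp [hbuf2, hbl]
        have hag2 : ∀ j : Nat, i + 2 ≤ (j : Int) → buf2[j]? = cs[j]? := by
          intro j hj
          rw [hbuf2, List.getElem?_set_ne (by omega), List.getElem?_set_ne (by omega)]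
          exact hag j (by omega)
        have hb1 : (maskB cs .comment (i+2) buf2)[i.toNat]? = some ' ' := by
          rw [maskB_preserve cs .comment (i+2) buf2 i.toNat (by omega), hbuf2,
            List.getElem?_set_ne (by omega)]
          exact hset1 buf hbl
        have hb2 : (maskB cs .comment (i+2) buf2)[(i+1).toNat]? = some ' ' := by
          rw [maskB_preserve cs .comment (i+2) buf2 (i+1).toNat (by omega), hbuf2]
          exact List.getElem?_set_self (by simp [hbl]; omega)
        rw [searchB_blank _ i h0 hb1, searchB_blank _ (i+1) (by omega) hb2]
        have := (ih (i+2) buf2 (by omega) (by omega) hbl2 hag2).2.1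
        rw [show i + 1 + 1 = i + 2 by ring, this, dite_eq_ite]
      · simp only [dif_neg hsl, if_neg hsl]
        by_cases hq : c = '"' ∨ c = '\''
        · simp only [if_pos hq]
          have hag2 : ∀ j : Nat, i + 1 ≤ (j : Int) → (buf.set i.toNat ' ')[j]? = cs[j]? := by
            intro j hj
            rw [List.getElem?_set_ne (by omega)]; exact hag j (by omega)
          have hb1 : (maskB cs (.instr c) (i+1) (buf.set i.toNat ' '))[i.toNat]? = some ' ' := by
            rw [maskB_preserve cs (.instr c) (i+1) _ i.toNat (by omega)]
            exact hset1 buf hbl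
          rw [searchB_blank _ i h0 hb1]
          have := (ih (i+1) (buf.set i.toNat ' ') (by omega) (by omega) (by simp [hbl]) hag2).2.2 c
          rw [this, skipStringA, hgd]
        · simp only [if_neg hq]
          have hgi : (maskB cs .normal (i+1) buf)[i.toNat]? = some c := by
            rw [maskB_preserve cs .normal (i+1) buf i.toNat (by omega),
              hag i.toNat (by omega), List.getElem?_eq_getElem hlt]
          by_cases hbr : c = '{'
          · simp only [if_pos hbr]
            rw [searchB_of_get _ i c h0 hgi, if_pos hbr]
          · simp only [if_neg hbr]
            by_cases hsc : c = ';' ∨ c = '}'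
            · simp only [if_pos hsc]
              rw [searchB_of_get _ i c h0 hgi, if_neg hbr, if_pos hsc]
            · simp only [if_neg hsc]
              rw [searchB_of_get _ i c h0 hgi, if_neg hbr, if_neg hsc]
              exact (ih (i+1) buf (by omega) (by omega) hbl
                (fun j hj => hag j (by omega))).1
    · -- comment mode: sanitize + scan ↔ A's find("*/") then resume
      rw [maskB]
      simp only [dif_pos hi, hgd]
      by_cases hm : c = '*' ∧ i + 1 < (cs.length : Int) ∧ (PySem.List.pyGet? cs (i+1)).getD '\x00' = '/'
      · simp only [if_pos hm]
        set buf2 := (buf.set i.toNat ' ').set (i+1).toNat ' ' with hbuf2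
        have hbl2 : buf2.length = cs.length := by simp [hbuf2, hbl]
        have hag2 : ∀ j : Nat, i + 2 ≤ (j : Int) → buf2[j]? = cs[j]? := by
          intro j hj
          rw [hbuf2, List.getElem?_set_ne (by omega), List.getElem?_set_ne (by omega)]
          exact hag j (by omega)
        have hb1 : (maskB cs .normal (i+2) buf2)[i.toNat]? = some ' ' := by
          rw [maskB_preserve cs .normal (i+2) buf2 i.toNat (by omega), hbuf2,
            List.getElem?_set_ne (by omega)]
          exact hset1 buf hbl
        have hb2 : (maskB cs .normal (i+2) buf2)[(i+1).toNat]? = some ' ' := by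
          rw [maskB_preserve cs .normal (i+2) buf2 (i+1).toNat (by omega), hbuf2]
          exact List.getElem?_set_self (by simp [hbl]; omega)
        rw [searchB_blank _ i h0 hb1, searchB_blank _ (i+1) (by omega) hb2]
        have hfs : findSS_A cs i = i := by
          rw [findSS_A]
          have h2 : i + 2 ≤ (cs.length : Int) := by omega
          have hcond : (PySem.List.pyGet? cs i).getD '\x00' = '*' ∧ (PySem.List.pyGet? cs (i+1)).getD '\x00' = '/' := by
            rw [hgd]; exact ⟨hm.1, hm.2.2⟩
          simp only [dif_pos h2, if_pos hcond]
        rw [hfs, if_neg (by omega), show i + 1 + 1 = i + 2 by ring]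
        exact (ih (i+2) buf2 (by omega) (by omega) hbl2 hag2).1
      · simp only [if_neg hm]
        have hag2 : ∀ j : Nat, i + 1 ≤ (j : Int) → (buf.set i.toNat ' ')[j]? = cs[j]? := by
          intro j hj
          rw [List.getElem?_set_ne (by omega)]; exact hag j (by omega)
        have hb1 : (maskB cs .comment (i+1) (buf.set i.toNat ' '))[i.toNat]? = some ' ' := by
          rw [maskB_preserve cs .comment (i+1) _ i.toNat (by omega)]
          exact hset1 buf hbl
        rw [searchB_blank _ i h0 hb1]
        have hcm := (ih (i+1) (buf.set i.toNat ' ') (by omega) (by omega) (by simp [hbl]) hag2).2.1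
        rw [hcm]
        by_cases h2 : i + 2 ≤ (cs.length : Int)
        · have hcond : ¬ ((PySem.List.pyGet? cs i).getD '\x00' = '*' ∧ (PySem.List.pyGet? cs (i+1)).getD '\x00' = '/') := by
            rw [hgd]; intro ⟨ha, hb⟩; exact hm ⟨ha, by omega, hb⟩
          conv_rhs => rw [findSS_A]
          simp only [dif_pos h2, if_neg hcond]
        · have hA : findSS_A cs i = -1 := by rw [findSS_A]; simp [h2]
          have hB : findSS_A cs (i+1) = -1 := by
            rw [findSS_A]
            have : ¬ (i + 1 + 2 ≤ (cs.length : Int)) := by omega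
            simp [this]
          rw [hA, hB]
    · -- string mode: sanitize + scan ↔ A's _skip_string then resume
      intro q
      rw [maskB]
      conv_rhs => rw [skipLoopA]
      simp only [dif_pos hi, hgd]
      by_cases hb : c = '\\'
      · simp only [if_pos hb]
        by_cases h1 : i + 1 < (cs.length : Int)
        · rw [if_pos h1]
          set buf2 := (buf.set i.toNat ' ').set (i+1).toNat ' ' with hbuf2
          have hbl2 : buf2.length = cs.length := by simp [hbuf2, hbl]
          have hag2 : ∀ j : Nat, i + 2 ≤ (j : Int) → buf2[j]? = cs[j]? := by
            intro j hj
            rw [hbuf2, List.getElem?_set_ne (by omega), List.getElem?_set_ne (by omega)]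
            exact hag j (by omega)
          have hb1 : (maskB cs (.instr q) (i+2) buf2)[i.toNat]? = some ' ' := by
            rw [maskB_preserve cs (.instr q) (i+2) buf2 i.toNat (by omega), hbuf2,
              List.getElem?_set_ne (by omega)]
            exact hset1 buf hbl
          have hb2 : (maskB cs (.instr q) (i+2) buf2)[(i+1).toNat]? = some ' ' := by
            rw [maskB_preserve cs (.instr q) (i+2) buf2 (i+1).toNat (by omega), hbuf2]
            exact List.getElem?_set_self (by simp [hbl]; omega)
          rw [searchB_blank _ i h0 hb1, searchB_blank _ (i+1) (by omega) hb2,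
            show i + 1 + 1 = i + 2 by ring]
          exact (ih (i+2) buf2 (by omega) (by omega) hbl2 hag2).2.2 q
        · rw [if_neg h1]
          have hb1 : (maskB cs (.instr q) (i+2) (buf.set i.toNat ' '))[i.toNat]? = some ' ' := by
            rw [maskB_preserve cs (.instr q) (i+2) _ i.toNat (by omega)]
            exact hset1 buf hbl
          have hml : (maskB cs (.instr q) (i+2) (buf.set i.toNat ' ')).length = cs.length := by
            rw [maskB_length]; simp [hbl]
          rw [searchB_blank _ i h0 hb1, searchB_end _ (i+1) (by rw [hml]; omega)]
          rw [skipLoopA]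
          have h2 : ¬ (i + 2 < (cs.length : Int)) := by omega
          simp only [dif_neg h2]
          rw [loopA]
          simp
      · simp only [if_neg hb]
        have hag2 : ∀ j : Nat, i + 1 ≤ (j : Int) → (buf.set i.toNat ' ')[j]? = cs[j]? := by
          intro j hj
          rw [List.getElem?_set_ne (by omega)]; exact hag j (by omega)
        by_cases hqq : c = q
        · simp only [if_pos hqq]
          have hb1 : (maskB cs .normal (i+1) (buf.set i.toNat ' '))[i.toNat]? = some ' ' := by
            rw [maskB_preserve cs .normal (i+1) _ i.toNat (by omega)]
            exact hset1 buf hbl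
          rw [searchB_blank _ i h0 hb1]
          exact (ih (i+1) (buf.set i.toNat ' ') (by omega) (by omega) (by simp [hbl]) hag2).1
        · simp only [if_neg hqq]
          have hb1 : (maskB cs (.instr q) (i+1) (buf.set i.toNat ' '))[i.toNat]? = some ' ' := by
            rw [maskB_preserve cs (.instr q) (i+1) _ i.toNat (by omega)]
            exact hset1 buf hbl
          rw [searchB_blank _ i h0 hb1]
          exact (ih (i+1) (buf.set i.toNat ' ') (by omega) (by omega) (by simp [hbl]) hag2).2.2 q

-- ===== VERDICT (by name: the statement is the Claim_ definition above) =====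
theorem find_brace_open_py_spec : Claim_equal_find_brace_open_py := by
  intro text start _ hpre
  unfold Spec_find_brace_open_py find_brace_open_py find_brace_open_py_alt
  exact ((css_mask text.toList (((text.toList.length : Int) - start).toNat) start text.toList
    hpre le_rfl rfl (fun _ _ => rfl)).1).symm
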